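-- pv_equiv track=rewrite | github.com/Jangmyun/Handong | BJStudy/대경권/1.py | can_remove_boxes
-- ===== SOURCE A (Python) =====
-- def can_remove_boxes(boxes):
--     rows = len(boxes)
--     cols = len(boxes[0]) if rows > 0 else 0
--
--     # 결과를 저장할 2차원 배열 초기화
--     result = [[0] * cols for _ in range(rows)]
--
--     for i in range(rows - 1, 0, -1):  # 밑에서부터 위로
--         for j in range(cols):
--             if boxes[i][j] == 0:
--                 continue
--             for k in range(i - 1, -1, -1):  # 현재 박스 위에 있는 박스들과 비교
--                 if boxes[k][j] != 0:  # 현재 박스 위에 있는 박스 발견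
--                     if (boxes[i][j] <= boxes[k][j]) and (boxes[i][j] >= boxes[k][j] - (i - k)):
--                         result[i][j] = 1  # 떨어지는 경우
--                     break
--
--     return result
-- ===== SOURCE B (Python) =====
-- def can_remove_boxes(boxes):
--     cols = len(boxes[0]) if boxes else 0
--     # per column: nearest nonzero box seen above, as (value, row), or None
--     last = [None] * cols
--     result = []
--     for i, row in enumerate(boxes):
--         out = []
--         for j in range(cols):
--             v = row[j]
--             r = 0
--             if v != 0 and last[j] is not None:
--                 pv, pk = last[j]
--                 if v <= pv and v >= pv - (i - pk):
--                     r = 1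
--             out.append(r)
--             if v != 0:
--                 last[j] = (v, i)
--         result.append(out)
--     return result
-- ===== Notes on version B (the rewrite author's own statement) =====
-- stated objective: faster
-- what changed: Instead of rescanning, for every nonzero cell, all rows above it for the nearest nonzero box, B makes one downward pass keeping per column the nearest nonzero box seen so far (value and row).
import Mathlib
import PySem

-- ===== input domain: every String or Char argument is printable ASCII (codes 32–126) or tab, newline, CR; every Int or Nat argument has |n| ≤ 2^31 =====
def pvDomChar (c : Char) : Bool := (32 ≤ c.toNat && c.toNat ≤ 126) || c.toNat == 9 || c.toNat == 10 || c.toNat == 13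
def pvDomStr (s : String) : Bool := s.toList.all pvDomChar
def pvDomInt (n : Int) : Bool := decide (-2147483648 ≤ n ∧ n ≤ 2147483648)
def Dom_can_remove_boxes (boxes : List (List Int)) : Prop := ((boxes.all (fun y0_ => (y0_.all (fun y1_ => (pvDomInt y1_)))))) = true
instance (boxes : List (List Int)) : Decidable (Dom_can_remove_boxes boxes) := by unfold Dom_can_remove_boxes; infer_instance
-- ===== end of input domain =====

-- B replaces A's quadratic per-cell upward rescan by one downward pass that tracks,
-- per column, the nearest nonzero box seen above (value and row): O(rows*cols) vs O(rows^2*cols).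

-- ===== PORT A =====
-- A's inner 'for k in range(i-1,-1,-1): if boxes[k][j] != 0: … break' — the scan upward
-- for the first nonzero box, as descending recursion; returns its value and row.
-- Indexing boxes[k][j] uses getD: exact under Pre_ (rows long enough), where Python cannot raise.
def aFind (boxes : List (List Int)) (j : Nat) : Nat → Option (Int × Nat)
  | 0 => none
  | k+1 =>
    let b := (boxes.getD k []).getD j 0
    if b ≠ 0 then some (b, k) else aFind boxes j k

-- body of 'for j in range(cols)' mutating row i of result in place
def aRow (boxes : List (List Int)) (cols i : Nat) (row0 : List Int) : List Int :=
  (List.range cols).foldl (fun row j =>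
    let bij := (boxes.getD i []).getD j 0
    if bij = 0 then row
    else
      match aFind boxes j i with
      | none => row
      | some (bkj, k) =>
        if bij ≤ bkj ∧ bij ≥ bkj - ((i : Int) - (k : Int)) then row.set j 1 else row) row0

-- 'for i in range(rows-1, 0, -1)' as descending recursion, processing indices n, n-1, …, 1
def aOuter (boxes : List (List Int)) (cols : Nat) : Nat → List (List Int) → List (List Int)
  | 0, res => res
  | n+1, res => aOuter boxes cols n (res.set (n+1) (aRow boxes cols (n+1) (res.getD (n+1) [])))

def can_remove_boxes (boxes : List (List Int)) : List (List Int) :=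
  let rows := boxes.length
  let cols := if rows > 0 then (boxes.getD 0 []).length else 0
  aOuter boxes cols (rows - 1) (List.replicate rows (List.replicate cols 0))

-- ===== PORT B =====
-- one downward pass; 'last' holds, per column, the nearest nonzero box above as (value, row)
def bGo (cols : Nat) : Nat → List (Option (Int × Nat)) → List (List Int) → List (List Int)
  | _, _, [] => []
  | i, last, row :: rest =>
    let s := (List.range cols).foldl
      (fun (s : List Int × List (Option (Int × Nat))) j =>
        let v := row.getD j 0
        let r : Int :=
          if v ≠ 0 then
            match s.2.getD j none with
            | none => 0
            | some (pv, pk) => if v ≤ pv ∧ v ≥ pv - ((i : Int) - (pk : Int)) then 1 else 0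
          else 0
        (s.1 ++ [r], if v ≠ 0 then s.2.set j (some (v, i)) else s.2)) ([], last)
    s.1 :: bGo cols (i+1) s.2 rest

def can_remove_boxes_alt (boxes : List (List Int)) : List (List Int) :=
  let cols := if boxes.length > 0 then (boxes.getD 0 []).length else 0
  bGo cols 0 (List.replicate cols none) boxes

-- ===== PRECONDITION & SPEC =====
-- Pre_ excludes exactly the inputs where A raises IndexError: some row shorter than the
-- first row (cols = len(boxes[0])); on any such input A's loops reach that row and raise.
def Pre_can_remove_boxes (boxes : List (List Int)) : Prop :=
  ∀ row ∈ boxes, (boxes.headD []).length ≤ row.length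
instance (boxes : List (List Int)) : Decidable (Pre_can_remove_boxes boxes) := by
  unfold Pre_can_remove_boxes; infer_instance

def pvWitness_can_remove_boxes : List (List Int) := [[0, 2], [3, 0], [2, 1]]

def Spec_can_remove_boxes (boxes : List (List Int)) (out : List (List Int)) : Prop :=
  out = can_remove_boxes_alt boxes
instance (boxes : List (List Int)) (out : List (List Int)) : Decidable (Spec_can_remove_boxes boxes out) := by
  unfold Spec_can_remove_boxes; infer_instance

-- ===== CLAIM (what is proved, stated in full; the proofs are below) =====
def Claim_equal_can_remove_boxes : Prop := ∀ (boxes : List (List Int)), Dom_can_remove_boxes boxes → Pre_can_remove_boxes boxes → Spec_can_remove_boxes boxes (can_remove_boxes boxes)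

-- ===== LEMMAS AND PROOFS =====

-- the value of result[i][j]: nonzero box with a nonzero box above it satisfying A's condition
def cellv (boxes : List (List Int)) (i j : Nat) : Int :=
  let v := (boxes.getD i []).getD j 0
  if v = 0 then 0
  else
    match aFind boxes j i with
    | none => 0
    | some (pv, k) => if v ≤ pv ∧ v ≥ pv - ((i : Int) - (k : Int)) then 1 else 0

def rowSpec (boxes : List (List Int)) (cols i : Nat) : List Int :=
  (List.range cols).map (cellv boxes i)

lemma mapIdx_id {α : Type} (l : List α) : l.mapIdx (fun _ x => x) = l := by
  apply List.ext_getElem <;> simp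

lemma and_lt_succ_iff (m n : Nat) (P : Prop) (h : m = n → ¬ P) :
    (m < n ∧ P) ↔ (m < n + 1 ∧ P) := by
  constructor
  · rintro ⟨ha, hb⟩; exact ⟨by omega, hb⟩
  · rintro ⟨ha, hb⟩
    refine ⟨?_, hb⟩
    by_cases hm : m = n
    · exact absurd hb (h hm)
    · omega

lemma cellv_cases (boxes : List (List Int)) (i j : Nat) :
    cellv boxes i j = 0 ∨ cellv boxes i j = 1 := by
  unfold cellv
  set v := (boxes.getD i []).getD j 0 with hv
  by_cases h0 : v = 0
  · left; simp [h0]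
  · cases hf : aFind boxes j i with
    | none => left; simp [h0, hf]
    | some p =>
      obtain ⟨pv, pk⟩ := p
      by_cases hc : v ≤ pv ∧ v ≥ pv - ((i : Int) - (pk : Int))
      · right; simp [h0, hf, hc]
      · left; simp [h0, hf, hc]; omega

lemma cellv_zero (boxes : List (List Int)) (j : Nat) : cellv boxes 0 j = 0 := by
  simp [cellv, aFind]

-- ---- A side ----

lemma aRow_step (boxes : List (List Int)) (i : Nat) (row : List Int) (j : Nat) :
    (let bij := (boxes.getD i []).getD j 0
     if bij = 0 then row
     else
       match aFind boxes j i with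
       | none => row
       | some (bkj, k) =>
         if bij ≤ bkj ∧ bij ≥ bkj - ((i : Int) - (k : Int)) then row.set j 1 else row)
    = if cellv boxes i j = 1 then row.set j 1 else row := by
  unfold cellv
  set v := (boxes.getD i []).getD j 0 with hv
  by_cases h0 : v = 0
  · simp [h0]
  · cases hf : aFind boxes j i with
    | none => simp [h0, hf]
    | some p =>
      obtain ⟨pv, pk⟩ := p
      by_cases hc : v ≤ pv ∧ v ≥ pv - ((i : Int) - (pk : Int))
      · simp [h0, hf, hc]
      · simp [h0, hf, hc]

lemma foldl_set_range (c : Nat → Bool) : ∀ (n : Nat) (r : List Int),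
    (List.range n).foldl (fun row j => if c j then row.set j 1 else row) r
    = r.mapIdx (fun j x => if j < n ∧ c j = true then 1 else x) := by
  intro n
  induction n with
  | zero =>
    intro r
    simp only [List.range_zero, List.foldl_nil]
    have : (fun (j : Nat) (x : Int) => if j < 0 ∧ c j = true then 1 else x)
        = fun _ x => x := by
      funext j x
      have : ¬ (j < 0 ∧ c j = true) := by rintro ⟨h, _⟩; omega
      rw [if_neg this]
    rw [this, mapIdx_id]
  | succ n ih =>
    intro r
    rw [List.range_succ, List.foldl_append, ih]
    simp only [List.foldl_cons, List.foldl_nil]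
    by_cases hc : c n
    · rw [if_pos hc]
      apply List.ext_getElem
      · simp
      · intro m h1 h2
        simp only [List.getElem_set, List.getElem_mapIdx]
        by_cases hm : n = m
        · subst hm; simp [hc]
        · rw [if_neg hm]; simp only [and_lt_succ_iff m n _ (fun hmn _ => hm hmn.symm)]
    · rw [if_neg hc]
      apply List.ext_getElem
      · simp
      · intro m h1 h2
        simp only [List.getElem_mapIdx]
        simp only [and_lt_succ_iff m n _ (fun hmn hp => by subst hmn; exact hc hp)]

lemma aRow_eq (boxes : List (List Int)) (cols i : Nat) :
    aRow boxes cols i (List.replicate cols 0) = rowSpec boxes cols i := by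
  unfold aRow
  have hstep : (fun (row : List Int) (j : Nat) =>
      let bij := (boxes.getD i []).getD j 0
      if bij = 0 then row
      else
        match aFind boxes j i with
        | none => row
        | some (bkj, k) =>
          if bij ≤ bkj ∧ bij ≥ bkj - ((i : Int) - (k : Int)) then row.set j 1 else row)
      = (fun (row : List Int) (j : Nat) => if decide (cellv boxes i j = 1) = true then row.set j 1 else row) := by
    funext row j
    rw [aRow_step]
    by_cases h : cellv boxes i j = 1 <;> simp [h]
  rw [hstep, foldl_set_range]
  unfold rowSpec
  apply List.ext_getElem
  · simp
  · intro m h1 h2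
    simp only [List.getElem_mapIdx, List.getElem_map, List.getElem_range, List.getElem_replicate]
    have hm : m < cols := by simpa using h1
    by_cases h : cellv boxes i m = 1
    · simp [h, hm]
    · have h0 : cellv boxes i m = 0 := (cellv_cases boxes i m).resolve_right h
      simp [h, hm, h0]

lemma getD_set_ne {α : Type} (l : List α) (i m : Nat) (v d : α) (h : m ≠ i) :
    (l.set i v).getD m d = l.getD m d := by
  simp [List.getD, List.getElem?_set_ne (Ne.symm h)]

lemma aOuter_eq (boxes : List (List Int)) (cols : Nat) : ∀ (n : Nat) (res : List (List Int)),
    (∀ m, 1 ≤ m → m ≤ n → res.getD m [] = List.replicate cols 0) →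
    aOuter boxes cols n res
      = res.mapIdx (fun m x => if 1 ≤ m ∧ m ≤ n then rowSpec boxes cols m else x) := by
  intro n
  induction n with
  | zero =>
    intro res _
    unfold aOuter
    have : (fun (m : Nat) (x : List Int) => if 1 ≤ m ∧ m ≤ 0 then rowSpec boxes cols m else x)
        = fun _ x => x := by
      funext m x
      have : ¬ (1 ≤ m ∧ m ≤ 0) := by omega
      rw [if_neg this]
    rw [this, mapIdx_id]
  | succ n ih =>
    intro res hres
    unfold aOuter
    rw [hres (n+1) (by omega) le_rfl, aRow_eq]
    rw [ih _ (by
      intro m hm1 hm2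
      rw [getD_set_ne _ _ _ _ _ (by omega)]
      exact hres m hm1 (by omega))]
    apply List.ext_getElem
    · simp
    · intro m h1 h2
      simp only [List.getElem_mapIdx, List.getElem_set]
      by_cases hm : n + 1 = m
      · subst hm
        have hA : ¬ (1 ≤ n + 1 ∧ n + 1 ≤ n) := by omega
        have hB : (1 ≤ n + 1 ∧ n + 1 ≤ n + 1) := by omega
        simp [hA, hB]
      · rw [if_neg hm]
        by_cases hA : 1 ≤ m ∧ m ≤ n
        · have hB : (1 ≤ m ∧ m ≤ n + 1) := ⟨hA.1, by omega⟩
          simp [hA, hB]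
        · have hB : ¬ (1 ≤ m ∧ m ≤ n + 1) := by
            rintro ⟨ha, hb⟩
            exact hA ⟨ha, by omega⟩
          simp [hA, hB]

lemma rowSpec_zero (boxes : List (List Int)) (cols : Nat) :
    rowSpec boxes cols 0 = List.replicate cols 0 := by
  unfold rowSpec
  apply List.ext_getElem <;> simp [cellv_zero]

lemma canA_eq (boxes : List (List Int)) :
    can_remove_boxes boxes
      = (List.range boxes.length).map (rowSpec boxes ((boxes.getD 0 []).length)) := by
  unfold can_remove_boxes
  have hcols : (if boxes.length > 0 then (boxes.getD 0 []).length else 0) = (boxes.getD 0 []).length := by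
    cases boxes <;> simp
  simp only [hcols]
  rw [aOuter_eq boxes _ _ _ (by
    intro m hm1 hm2
    have hm : m < boxes.length := by omega
    simp [List.getD, List.getElem?_replicate, hm])]
  apply List.ext_getElem
  · simp
  · intro m h1 h2
    have hm : m < boxes.length := by simpa using h1
    simp only [List.getElem_mapIdx, List.getElem_map, List.getElem_range, List.getElem_replicate]
    by_cases hc : 1 ≤ m ∧ m ≤ boxes.length - 1
    · simp [hc]
    · have hm0 : m = 0 := by omega
      subst hm0
      simp [hc, rowSpec_zero]

-- ---- B side ----

-- the per-cell value B computes from the tracked state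
def rcell (row : List Int) (i : Nat) (last : List (Option (Int × Nat))) (j : Nat) : Int :=
  let v := row.getD j 0
  if v ≠ 0 then
    match last.getD j none with
    | none => 0
    | some (pv, pk) => if v ≤ pv ∧ v ≥ pv - ((i : Int) - (pk : Int)) then 1 else 0
  else 0

def updN (row : List Int) (i : Nat) (last : List (Option (Int × Nat))) (n : Nat) :
    List (Option (Int × Nat)) :=
  last.mapIdx (fun j o => if j < n ∧ row.getD j 0 ≠ 0 then some (row.getD j 0, i) else o)

lemma updN_getD_ge (row : List Int) (i : Nat) (last : List (Option (Int × Nat))) (n m : Nat)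
    (h : n ≤ m) : (updN row i last n).getD m none = last.getD m none := by
  unfold updN
  simp only [List.getD]
  by_cases hm : m < last.length
  · rw [List.getElem?_eq_getElem (by simpa using hm), List.getElem?_eq_getElem hm]
    simp only [List.getElem_mapIdx]
    have this' : ¬ (m < n ∧ row[m]?.getD 0 ≠ 0) := by
      simpa [List.getD] using (by rintro ⟨h1, _⟩; omega : ¬ (m < n ∧ row.getD m 0 ≠ 0))
    rw [if_neg this']
  · rw [List.getElem?_eq_none (by simpa using hm), List.getElem?_eq_none (by simpa using hm)]

lemma bInner_eq (row : List Int) (i : Nat) (last : List (Option (Int × Nat))) :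
    ∀ (n : Nat) (acc : List Int),
    (List.range n).foldl
      (fun (s : List Int × List (Option (Int × Nat))) j =>
        let v := row.getD j 0
        let r : Int :=
          if v ≠ 0 then
            match s.2.getD j none with
            | none => 0
            | some (pv, pk) => if v ≤ pv ∧ v ≥ pv - ((i : Int) - (pk : Int)) then 1 else 0
          else 0
        (s.1 ++ [r], if v ≠ 0 then s.2.set j (some (v, i)) else s.2)) (acc, last)
    = (acc ++ (List.range n).map (rcell row i last), updN row i last n) := by
  intro n
  induction n with
  | zero =>
    intro acc
    simp only [List.range_zero, List.foldl_nil, List.map_nil, List.append_nil]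
    refine Prod.ext rfl ?_
    show last = updN row i last 0
    unfold updN
    apply List.ext_getElem
    · simp
    · intro m h1 h2
      simp only [List.getElem_mapIdx]
      have : ¬ (m < 0 ∧ row.getD m 0 ≠ 0) := by rintro ⟨h, _⟩; omega
      simp [this]
  | succ n ih =>
    intro acc
    rw [List.range_succ, List.foldl_append, ih]
    simp only [List.foldl_cons, List.foldl_nil]
    have hread : (updN row i last n).getD n none = last.getD n none := updN_getD_ge _ _ _ _ _ le_rfl
    refine Prod.ext ?_ ?_
    · show acc ++ _ ++ [_] = acc ++ _
      rw [hread, List.map_append]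
      simp [rcell, List.append_assoc]
    · show (if row.getD n 0 ≠ 0 then (updN row i last n).set n (some (row.getD n 0, i))
          else updN row i last n) = updN row i last (n+1)
      by_cases hv : row.getD n 0 ≠ 0
      · rw [if_pos hv]
        unfold updN
        apply List.ext_getElem
        · simp
        · intro m h1 h2
          simp only [List.getElem_set, List.getElem_mapIdx]
          by_cases hm : n = m
          · subst hm
            have hv' : row[n]?.getD 0 ≠ 0 := by simpa [List.getD] using hv
            simp [hv']
          · rw [if_neg hm]; simp only [and_lt_succ_iff m n _ (fun hmn _ => hm hmn.symm)]
      · rw [if_neg hv]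
        unfold updN
        apply List.ext_getElem
        · simp
        · intro m h1 h2
          simp only [List.getElem_mapIdx]
          simp only [and_lt_succ_iff m n _ (fun hmn hp => by subst hmn; exact hv hp)]

lemma drop_getD (boxes : List (List Int)) (i : Nat) (row : List Int) (rest : List (List Int))
    (h : boxes.drop i = row :: rest) : boxes.getD i [] = row := by
  have h0 : (boxes.drop i)[0]? = some row := by rw [h]; rfl
  rw [List.getElem?_drop] at h0
  simp only [Nat.add_zero] at h0
  simp [List.getD, h0]

lemma bGo_eq (boxes : List (List Int)) (cols : Nat) :
    ∀ (rest : List (List Int)) (i : Nat) (last : List (Option (Int × Nat))),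
    boxes.drop i = rest →
    last = (List.range cols).map (fun j => aFind boxes j i) →
    bGo cols i last rest = (List.range rest.length).map (fun t => rowSpec boxes cols (i + t)) := by
  intro rest
  induction rest with
  | nil => intro i last _ _; simp [bGo]
  | cons row rest ih =>
    intro i last hdrop hlast
    have hrow : boxes.getD i [] = row := drop_getD boxes i row rest hdrop
    have hrest : boxes.drop (i+1) = rest := by
      have := congrArg List.tail hdrop
      simpa [List.tail_drop] using this
    have hcell : (List.range cols).map (rcell row i last) = (List.range cols).map (cellv boxes i) := by
      apply List.map_congr_left
      intro j hj
      have hjc : j < cols := by simpa using hj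
      unfold rcell cellv
      rw [hrow, hlast]
      simp only [List.getD, List.getElem?_map, List.getElem?_range hjc, Option.map_some,
        Option.getD_some]
      by_cases hv : row.getD j 0 = 0 <;> simp [hv]
    have hupd : updN row i last cols = (List.range cols).map (fun j => aFind boxes j (i+1)) := by
      subst hlast
      unfold updN
      apply List.ext_getElem
      · simp
      · intro m h1 h2
        have hmc : m < cols := by simpa using h1
        have hA : aFind boxes m (i+1)
            = if row.getD m 0 ≠ 0 then some (row.getD m 0, i) else aFind boxes m i := by
          show (let b := (boxes.getD i []).getD m 0
            if b ≠ 0 then some (b, i) else aFind boxes m i) = _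
          rw [hrow]
        simp only [List.getElem_mapIdx, List.getElem_map, List.getElem_range]
        rw [hA]
        by_cases hv : row.getD m 0 = 0
        · have hv' : row[m]?.getD 0 = 0 := by simpa [List.getD] using hv
          simp [hv', hmc]
        · have hv' : ¬ row[m]?.getD 0 = 0 := by simpa [List.getD] using hv
          simp [hv', hmc]
    unfold bGo
    rw [bInner_eq row i last cols []]
    simp only [List.nil_append]
    rw [hcell, hupd, ih (i+1) _ hrest rfl]
    simp only [List.length_cons, List.range_succ_eq_map, List.map_cons, List.map_map, Nat.add_zero]
    congr 1
    apply List.map_congr_left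
    intro t _
    simp only [Function.comp_apply]
    congr 1
    omega

lemma canB_eq (boxes : List (List Int)) :
    can_remove_boxes_alt boxes
      = (List.range boxes.length).map (rowSpec boxes ((boxes.getD 0 []).length)) := by
  unfold can_remove_boxes_alt
  have hcols : (if boxes.length > 0 then (boxes.getD 0 []).length else 0) = (boxes.getD 0 []).length := by
    cases boxes <;> simp
  simp only [hcols]
  rw [bGo_eq boxes _ boxes 0 _ (by simp) (by
    apply List.ext_getElem
    · simp
    · intro m h1 h2
      simp [aFind])]
  simp

-- ===== VERDICT (by name: the statement is the Claim_ definition above) =====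
theorem can_remove_boxes_spec : Claim_equal_can_remove_boxes := by
  intro boxes _ _
  unfold Spec_can_remove_boxes
  rw [canA_eq, canB_eq]
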